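-- pv_equiv track=rewrite | github.com/yuxiaolejs/cs138-hw3-q2-autograder | exhaustTest.py | generate_string_sequential
-- ===== SOURCE A (Python) =====
-- def generate_string_sequential(n,length):
--     string = ""
--     while n > 0:
--         string = chr(97 + n % 3) + string
--         n = n // 3
--     while len(string) < length:
--         string = "a" + string
--     return string
-- ===== SOURCE B (Python) =====
-- def generate_string_sequential(n, length):
--     if n <= 0:
--         return "a" * length
--     d = 0
--     while 3 ** d <= n:
--         d += 1
--     width = max(d, length)
--     return "a" * (width - d) + "".join(chr(97 + (n // 3 ** i) % 3) for i in range(d - 1, -1, -1))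
-- ===== Notes on version B (the rewrite author's own statement) =====
-- stated objective: faster
-- what changed: Instead of A's divmod loop that prepends digits one by one and a second loop that left-pads with 'a' one character at a time, B computes the digit count d up front, produces the whole padding arithmetically as 'a' * (max(d, length) - d), and emits each digit independently by the positional formula (n // 3**i) % 3 over i = d-1..0.
import Mathlib
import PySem

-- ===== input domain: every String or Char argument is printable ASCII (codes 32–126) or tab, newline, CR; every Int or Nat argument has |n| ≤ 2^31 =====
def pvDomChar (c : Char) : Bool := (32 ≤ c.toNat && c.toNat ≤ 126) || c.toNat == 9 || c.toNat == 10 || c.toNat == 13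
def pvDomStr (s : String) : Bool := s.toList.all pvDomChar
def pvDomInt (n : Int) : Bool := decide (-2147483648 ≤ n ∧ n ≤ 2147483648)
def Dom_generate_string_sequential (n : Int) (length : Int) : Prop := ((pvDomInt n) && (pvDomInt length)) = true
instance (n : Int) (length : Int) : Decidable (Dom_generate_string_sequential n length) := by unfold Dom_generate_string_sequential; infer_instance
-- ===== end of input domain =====

-- B replaces A's divmod loop + character-by-character padding loop with a digit count d
-- computed up front, an arithmetic padding "a" * (max(d, length) - d), and the positional
-- digit formula chr(97 + (n // 3**i) % 3) (objective: faster on large `length`, as measured).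

-- ===== PORT A =====
-- while n > 0: string = chr(97 + n % 3) + string; n = n // 3   (string carried as List Char)
def pvLoopA (n : Int) (acc : List Char) : List Char :=
  if h : 0 < n then
    pvLoopA (PySem.Int.floordiv n 3) (Char.ofNat (97 + PySem.Int.mod n 3).toNat :: acc)
  else acc
termination_by n.toNat
decreasing_by
  have hm : n = ((n.toNat : Nat) : Int) := by omega
  have h3 : PySem.Int.floordiv n 3 = ((n.toNat / 3 : Nat) : Int) := by
    rw [hm]; exact_mod_cast PySem.Int.floordiv_natCast n.toNat 3
  have h4 : n.toNat / 3 < n.toNat := Nat.div_lt_self (by omega) (by norm_num)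
  omega

-- while len(string) < length: string = "a" + string
def pvPadA (s : List Char) (length : Int) : List Char :=
  if h : (s.length : Int) < length then pvPadA ('a' :: s) length else s
termination_by (length - s.length).toNat
decreasing_by simp; omega

def generate_string_sequential (n : Int) (length : Int) : String :=
  String.mk (pvPadA (pvLoopA n []) length)

-- ===== PORT B =====
-- d = 0; while 3 ** d <= n: d += 1
def pvDigitCount (n : Int) (d : Nat) : Nat :=
  if h : (3 : Int) ^ d ≤ n then pvDigitCount n (d + 1) else d
termination_by (n + 1 - 3 ^ d).toNat
decreasing_by
  have h1 : (0 : Int) < 3 ^ d := pow_pos (by norm_num) d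
  have h2 : (3 : Int) ^ (d + 1) = 3 ^ d * 3 := pow_succ 3 d
  omega

-- "a" * (width - d) + "".join(chr(97 + (n // 3 ** i) % 3) for i in range(d - 1, -1, -1));
-- every i produced by the range is ≥ 0, so 3 ** i is ported exactly as 3 ^ i.toNat
def generate_string_sequential_alt (n : Int) (length : Int) : String :=
  if n ≤ 0 then String.mk (PySem.List.pyRepeat ['a'] length)
  else
    let d : Int := (pvDigitCount n 0 : Int)
    let width : Int := max d length
    String.mk (PySem.List.pyRepeat ['a'] (width - d) ++
      (PySem.List.pyRange (d - 1) (-1) (-1)).map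
        (fun i => Char.ofNat (97 + PySem.Int.mod (PySem.Int.floordiv n ((3 : Int) ^ i.toNat)) 3).toNat))

-- ===== PRECONDITION & SPEC =====
def Spec_generate_string_sequential (n : Int) (length : Int) (out : String) : Prop := out = generate_string_sequential_alt n length
instance (n : Int) (length : Int) (out : String) : Decidable (Spec_generate_string_sequential n length out) := by unfold Spec_generate_string_sequential; infer_instance

-- ===== CLAIM (what is proved, stated in full; the proofs are below) =====
def Claim_equal_generate_string_sequential : Prop := ∀ (n : Int) (length : Int), Dom_generate_string_sequential n length → Spec_generate_string_sequential n length (generate_string_sequential n length)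

-- ===== LEMMAS AND PROOFS =====

-- proof-side model of A's digit loop, on Nat
def pvNatDigits (m : Nat) : List Char :=
  if h : m = 0 then [] else pvNatDigits (m / 3) ++ [Char.ofNat (97 + m % 3)]
termination_by m
decreasing_by exact Nat.div_lt_self (Nat.pos_of_ne_zero h) (by norm_num)

theorem pvLoopA_eq (n : Int) (acc : List Char) :
    pvLoopA n acc = pvNatDigits n.toNat ++ acc := by
  fun_induction pvLoopA n acc with
  | case1 n acc h ih =>
    have hm : n = ((n.toNat : Nat) : Int) := by omega
    have hdiv : PySem.Int.floordiv n 3 = ((n.toNat / 3 : Nat) : Int) := by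
      rw [hm]; exact_mod_cast PySem.Int.floordiv_natCast n.toNat 3
    have hmod : PySem.Int.mod n 3 = ((n.toNat % 3 : Nat) : Int) := by
      rw [hm]; exact_mod_cast PySem.Int.mod_natCast n.toNat 3
    rw [ih, hdiv, hmod, Int.toNat_natCast]
    have hchar : (97 + ((n.toNat % 3 : Nat) : Int)).toNat = 97 + n.toNat % 3 := by omega
    rw [hchar]
    conv_rhs => rw [show pvNatDigits n.toNat
      = pvNatDigits (n.toNat / 3) ++ [Char.ofNat (97 + n.toNat % 3)] from by
        rw [pvNatDigits]; simp [show ¬ n.toNat = 0 by omega]]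
    simp
  | case2 n acc h =>
    have h0 : n.toNat = 0 := by omega
    rw [h0, pvNatDigits]; simp

theorem pvPadA_eq (s : List Char) (length : Int) :
    pvPadA s length = List.replicate (length - s.length).toNat 'a' ++ s := by
  fun_induction pvPadA s length with
  | case1 s h ih =>
    rw [ih]
    have h1 : (length - ((('a' :: s).length : Nat) : Int)).toNat + 1 = (length - s.length).toNat := by
      simp; omega
    rw [← h1, List.replicate_succ']
    simp
  | case2 s h =>
    have : (length - s.length).toNat = 0 := by omega
    rw [this]; simp

-- digit-count bracket: for 0 < n, pvDigitCount n 0 is the unique e with 3^(e-1) ≤ n < 3^e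
theorem pvDigitCount_bracket (n : Int) (d : Nat) :
    n < 3 ^ (pvDigitCount n d) ∧ (pvDigitCount n d = d ∨ (3 : Int) ^ (pvDigitCount n d - 1) ≤ n)
      ∧ d ≤ pvDigitCount n d := by
  fun_induction pvDigitCount n d with
  | case1 d h ih =>
    refine ⟨ih.1, ?_, by omega⟩
    rcases ih.2.1 with h1 | h1
    · right; rw [h1]; simpa using h
    · right; exact h1
  | case2 d h => exact ⟨by omega, Or.inl rfl, le_refl d⟩

-- length bracket for pvNatDigits
theorem pvNatDigits_bracket (m : Nat) :
    m < 3 ^ (pvNatDigits m).length ∧ (0 < m → 3 ^ ((pvNatDigits m).length - 1) ≤ m) := by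
  fun_induction pvNatDigits m with
  | case1 => simp
  | case2 m h ih =>
    have hlen : (pvNatDigits (m / 3) ++ [Char.ofNat (97 + m % 3)]).length
        = (pvNatDigits (m / 3)).length + 1 := by simp
    rw [hlen]
    refine ⟨?_, fun _ => ?_⟩
    · have h1 := ih.1
      have h2 : (3 : ℕ) ^ ((pvNatDigits (m / 3)).length + 1)
          = 3 ^ (pvNatDigits (m / 3)).length * 3 := pow_succ 3 _
      omega
    · simp only [Nat.add_sub_cancel]
      by_cases h3 : m / 3 = 0
      · have hL0 : (pvNatDigits (m / 3)).length = 0 := by rw [h3, pvNatDigits]; simp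
        rw [hL0]
        simpa using Nat.one_le_iff_ne_zero.mpr h
      · have h2 := ih.2 (Nat.pos_of_ne_zero h3)
        have hLpos : 0 < (pvNatDigits (m / 3)).length := by
          by_contra hc
          have h1 := ih.1
          have e0 : (pvNatDigits (m / 3)).length = 0 := by omega
          rw [e0] at h1
          simp at h1
          omega
        have hs : (3 : ℕ) ^ (pvNatDigits (m / 3)).length
            = 3 ^ ((pvNatDigits (m / 3)).length - 1) * 3 := by
          rw [← pow_succ]; congr 1; omega
        rw [hs]
        have h4 := Nat.mul_le_mul_right 3 h2
        have h5 := Nat.div_mul_le_self m 3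
        omega

-- positional formula: if m < 3^W then the digit map over positions W-1..0 is
-- the 'a'-padding followed by pvNatDigits m
theorem pvPositional (W m : Nat) (h : m < 3 ^ W) :
    (List.range W).map (fun k => Char.ofNat (97 + m / 3 ^ (W - 1 - k) % 3))
      = List.replicate (W - (pvNatDigits m).length) 'a' ++ pvNatDigits m := by
  induction W generalizing m with
  | zero =>
    have : m = 0 := by simpa using h
    subst this
    rw [pvNatDigits]; simp
  | succ W ih =>
    rw [List.range_succ, List.map_append]
    have hstep : ∀ k ∈ List.range W,
        Char.ofNat (97 + m / 3 ^ (W + 1 - 1 - k) % 3)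
          = Char.ofNat (97 + (m / 3) / 3 ^ (W - 1 - k) % 3) := by
      intro k hk
      have hk' : k < W := List.mem_range.mp hk
      have he : W + 1 - 1 - k = (W - 1 - k) + 1 := by omega
      rw [he, pow_succ, Nat.mul_comm, ← Nat.div_div_eq_div_mul]
    rw [List.map_congr_left hstep]
    have hm3 : m / 3 < 3 ^ W := by
      rw [Nat.div_lt_iff_lt_mul (by norm_num), ← pow_succ]
      exact h
    rw [ih (m / 3) hm3]
    have hlast : List.map (fun k => Char.ofNat (97 + m / 3 ^ (W + 1 - 1 - k) % 3)) [W]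
        = [Char.ofNat (97 + m % 3)] := by
      simp
    rw [hlast]
    by_cases hm : m = 0
    · subst hm
      rw [show pvNatDigits 0 = [] from by rw [pvNatDigits]; simp]
      simp [List.replicate_succ' (n := W), show Char.ofNat 97 = 'a' from rfl]
    · have hdig : pvNatDigits m = pvNatDigits (m / 3) ++ [Char.ofNat (97 + m % 3)] := by
        rw [pvNatDigits]; simp [hm]
      rw [hdig]
      have h2 : W + 1 - (pvNatDigits (m / 3) ++ [Char.ofNat (97 + m % 3)]).length
          = W - (pvNatDigits (m / 3)).length := by
        have hLle : (pvNatDigits (m / 3)).length ≤ W := by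
          by_cases h30 : m / 3 = 0
          · rw [h30, show pvNatDigits 0 = [] from by rw [pvNatDigits]; simp]
            simp
          · have h1 := (pvNatDigits_bracket (m / 3)).2 (Nat.pos_of_ne_zero h30)
            by_contra hc
            have hb : (3 : ℕ) ^ W ≤ 3 ^ ((pvNatDigits (m / 3)).length - 1) :=
              Nat.pow_le_pow_right (by norm_num) (by omega)
            omega
        simp only [List.length_append, List.length_cons, List.length_nil]
        omega
      rw [h2, List.append_assoc]

-- ===== VERDICT (by name: the statement is the Claim_ definition above) =====
theorem generate_string_sequential_spec : Claim_equal_generate_string_sequential := by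
  intro n length _
  unfold Spec_generate_string_sequential
  unfold generate_string_sequential generate_string_sequential_alt
  by_cases hn : n ≤ 0
  · rw [if_pos hn]
    have hloop : pvLoopA n [] = [] := by
      rw [pvLoopA]; simp [show ¬ 0 < n by omega]
    rw [hloop, pvPadA_eq, PySem.List.pyRepeat_singleton]
    simp
  · rw [if_neg hn]
    dsimp only
    have hm : n = ((n.toNat : Nat) : Int) := by omega
    set m := n.toNat with hmdef
    have hm0 : 0 < m := by omega
    rw [pvLoopA_eq, List.append_nil, pvPadA_eq]
    set L := (pvNatDigits m).length with hLdef
    have hcast : ∀ e : Nat, ((3 : Int) ^ e) = ((3 ^ e : Nat) : Int) := by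
      intro e; push_cast; ring
    have h3 := (pvNatDigits_bracket m).1
    have h4 := (pvNatDigits_bracket m).2 hm0
    rw [← hLdef] at h3 h4
    have hL1 : 1 ≤ L := by
      by_contra hc
      have e0 : L = 0 := by omega
      rw [e0] at h3
      simp at h3
      omega
    -- the digit count of B equals the length of A's digit string
    have hr := pvDigitCount_bracket n 0
    set r := pvDigitCount n 0 with hrdef
    have hrL : r = L := by
      have h1 : m < 3 ^ r := by
        have h1' := hr.1
        rw [hm, hcast] at h1'
        exact_mod_cast h1'
      have h2 : 3 ^ (r - 1) ≤ m := by
        rcases hr.2.1 with h0 | h0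
        · exfalso
          have h1' := hr.1
          rw [h0] at h1'
          simp at h1'
          omega
        · rw [hm, hcast] at h0
          exact_mod_cast h0
      by_contra hne
      rcases Nat.lt_or_ge r L with hlt | hge
      · have hp : (3 : ℕ) ^ r ≤ 3 ^ (L - 1) := Nat.pow_le_pow_right (by norm_num) (by omega)
        omega
      · have hp : (3 : ℕ) ^ L ≤ 3 ^ (r - 1) := Nat.pow_le_pow_right (by norm_num) (by omega)
        omega
    rw [hrL]
    set width := max ((L : Nat) : Int) length with hwdef
    have hwl : ((L : Nat) : Int) ≤ width := le_max_left _ _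
    have hwr : length ≤ width := le_max_right _ _
    rw [PySem.List.pyRepeat_singleton, PySem.List.pyRange_neg_one,
      show (((L : Nat) : Int) - 1 - (-1 : Int)).toNat = L by omega, List.map_map]
    have hfun : ∀ k ∈ List.range L,
        ((fun i => Char.ofNat
            (97 + PySem.Int.mod (PySem.Int.floordiv n ((3 : Int) ^ i.toNat)) 3).toNat)
          ∘ (fun k : Nat => ((L : Nat) : Int) - 1 - (k : Int))) k
          = Char.ofNat (97 + m / 3 ^ (L - 1 - k) % 3) := by
      intro k hk
      have hkL : k < L := List.mem_range.mp hk
      simp only [Function.comp_apply]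
      rw [show (((L : Nat) : Int) - 1 - (k : Int)).toNat = L - 1 - k by omega]
      rw [show PySem.Int.floordiv n ((3 : Int) ^ (L - 1 - k))
            = ((m / 3 ^ (L - 1 - k) : Nat) : Int) from by
        rw [hm, hcast]
        exact_mod_cast PySem.Int.floordiv_natCast m (3 ^ (L - 1 - k))]
      rw [show PySem.Int.mod ((m / 3 ^ (L - 1 - k) : Nat) : Int) 3
            = ((m / 3 ^ (L - 1 - k) % 3 : Nat) : Int) from by
        exact_mod_cast PySem.Int.mod_natCast (m / 3 ^ (L - 1 - k)) 3]
      rw [show (97 + ((m / 3 ^ (L - 1 - k) % 3 : Nat) : Int)).toNat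
            = 97 + m / 3 ^ (L - 1 - k) % 3 from by omega]
    rw [List.map_congr_left hfun, pvPositional L m h3, Nat.sub_self, List.replicate_zero,
      List.nil_append]
    rw [show (length - ((L : Nat) : Int)).toNat = (width - ((L : Nat) : Int)).toNat from by
      rcases max_choice ((L : Nat) : Int) length with hc | hc <;> omega]
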